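-- pv_equiv track=rewrite | github.com/ierosegen98/MyPythonProjects | Сводка заказов в кафе/zakaz.py | more_one
-- ===== SOURCE A (Python) =====
-- def more_one(orders, clients):
--     clients_more_one = []
--     for client in clients:
--         dishes = set()
--         for order in orders:
--             if order[0] == client:
--                 dishes.add(order[1])
--         if len(dishes) > 1:
--             clients_more_one.append(client)
--     return clients_more_one
-- ===== SOURCE B (Python) =====
-- def more_one(orders, clients):
--     dishes = {}
--     for client, dish in orders:
--         s = dishes.get(client, set())
--         s.add(dish)
--         dishes[client] = s
--     return [c for c in clients if len(dishes.get(c, set())) > 1]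
-- ===== Notes on version B (the rewrite author's own statement) =====
-- stated objective: faster
-- what changed: One pass over orders builds a client-to-dish-set dict, replacing the per-client rescan of all orders.
import Mathlib
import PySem

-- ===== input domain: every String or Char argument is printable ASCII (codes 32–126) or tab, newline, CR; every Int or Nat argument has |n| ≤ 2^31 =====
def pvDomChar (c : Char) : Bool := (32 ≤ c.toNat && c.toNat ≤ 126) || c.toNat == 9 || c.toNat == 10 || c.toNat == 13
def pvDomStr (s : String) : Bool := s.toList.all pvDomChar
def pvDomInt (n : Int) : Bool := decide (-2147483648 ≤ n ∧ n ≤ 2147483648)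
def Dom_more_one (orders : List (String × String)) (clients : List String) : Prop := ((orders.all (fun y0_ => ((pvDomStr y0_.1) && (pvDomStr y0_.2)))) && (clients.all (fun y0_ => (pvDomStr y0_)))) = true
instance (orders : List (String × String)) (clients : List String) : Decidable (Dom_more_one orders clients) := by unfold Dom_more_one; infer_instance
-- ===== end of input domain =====

-- B replaces A's per-client rescan of all orders by one grouping pass (client → dish set), an asymptotic speed-up.

-- ===== PORT A =====
def more_one (orders : List (String × String)) (clients : List String) : List String :=
  clients.foldl (fun acc client =>
    let dishes : PySem.Set String :=
      orders.foldl (fun s ord => if ord.1 == client then PySem.Set.add s ord.2 else s) PySem.Set.empty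
    if 1 < PySem.Set.len dishes then acc ++ [client] else acc) []

-- ===== PORT B =====
def more_one_alt (orders : List (String × String)) (clients : List String) : List String :=
  let dishes : PySem.Dict String (PySem.Set String) :=
    orders.foldl (fun d p => d.modify p.1 PySem.Set.empty (fun s => PySem.Set.add s p.2)) PySem.Dict.empty
  clients.filter (fun c => 1 < PySem.Set.len (dishes.getD c PySem.Set.empty))

-- ===== PRECONDITION & SPEC =====
def Spec_more_one (orders : List (String × String)) (clients : List String) (out : List String) : Prop := out = more_one_alt orders clients
instance (orders : List (String × String)) (clients : List String) (out : List String) : Decidable (Spec_more_one orders clients out) := by unfold Spec_more_one; infer_instance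

-- ===== CLAIM (what is proved, stated in full; the proofs are below) =====
def Claim_equal_more_one : Prop := ∀ (orders : List (String × String)) (clients : List String), Dom_more_one orders clients → Spec_more_one orders clients (more_one orders clients)

-- ===== LEMMAS AND PROOFS =====

-- Looking up a client in B's grouping dict yields exactly A's per-client fold over orders.
theorem getD_group_fold (orders : List (String × String)) (c : String)
    (d : PySem.Dict String (PySem.Set String)) :
    (orders.foldl (fun d p => d.modify p.1 PySem.Set.empty (fun s => PySem.Set.add s p.2)) d).getD c PySem.Set.empty
    = orders.foldl (fun s p => if p.1 == c then PySem.Set.add s p.2 else s) (d.getD c PySem.Set.empty) := by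
  induction orders generalizing d with
  | nil => rfl
  | cons p rest ih =>
    simp only [List.foldl_cons, ih]
    rw [PySem.Dict.getD_modify]
    by_cases h : c = p.1
    · simp [h]
    · rw [if_neg h]; simp [Ne.symm h]

theorem more_one_spec : Claim_equal_more_one := by
  intro orders clients _
  unfold Spec_more_one more_one more_one_alt
  rw [show (fun acc client =>
      let dishes : PySem.Set String :=
        orders.foldl (fun s ord => if ord.1 == client then PySem.Set.add s ord.2 else s) PySem.Set.empty
      if 1 < PySem.Set.len dishes then acc ++ [client] else acc)
    = (fun (acc : List String) client =>
      if 1 < PySem.Set.len ((orders.foldl (fun d p => d.modify p.1 PySem.Set.empty (fun s => PySem.Set.add s p.2)) PySem.Dict.empty).getD client PySem.Set.empty)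
      then acc ++ [client] else acc) from by
      funext acc client
      rw [getD_group_fold]
      rfl]
  rw [PySem.List.foldl_append_ite_eq_filter]
  simp
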